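-- pv_equiv track=rewrite | github.com/cgreggescalante/Challenges | Kattis/Complete/misa.py | count
-- ===== SOURCE A (Python) =====
-- def count(grid):
--     c = 0
--     for i in range(len(grid)):
--         for j in range(len(grid[0])):
--             if grid[i][j]:
--                 if i < len(grid) - 1:
--                     c += grid[i + 1][j]
--                 if j < len(grid[0]) - 1:
--                     c += grid[i][j+1]
--                 if j > 0 and i < len(grid) - 1:
--                     c += grid[i+1][j-1]
--                 if i < len(grid) - 1 and j < len(grid[0]) - 1:
--                     c += grid[i+1][j+1]
--     return c
-- ===== SOURCE B (Python) =====
-- def count(grid):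
--     if not grid:
--         return 0
--     w = len(grid[0])
--     # flatten into one sentinel-padded 1-D array: each row truncated to w plus a
--     # zero separator, then one extra zero row; adjacency becomes fixed strides,
--     # the sentinels make every boundary branch disappear (adding 0 = skipping).
--     flat = [x for row in grid for x in row[:w] + [0]] + [0] * (w + 1)
--     total = 0
--     for k in range(len(grid) * (w + 1)):
--         if flat[k]:
--             total += flat[k + 1] + flat[k + w] + flat[k + w + 1] + flat[k + w + 2]
--     return total
-- ===== Notes on version B (the rewrite author's own statement) =====
-- stated objective: alternative
-- what changed: B abandons the 2-D double loop with four boundary-checked neighbor additions: it flattens the grid into a single 1-D array with a zero sentinel after each row and a trailing zero row, so each adjacency direction becomes one fixed stride (1, w, w+1, w+2) and every boundary branch disappears (the sentinels contribute 0).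
import Mathlib
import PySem

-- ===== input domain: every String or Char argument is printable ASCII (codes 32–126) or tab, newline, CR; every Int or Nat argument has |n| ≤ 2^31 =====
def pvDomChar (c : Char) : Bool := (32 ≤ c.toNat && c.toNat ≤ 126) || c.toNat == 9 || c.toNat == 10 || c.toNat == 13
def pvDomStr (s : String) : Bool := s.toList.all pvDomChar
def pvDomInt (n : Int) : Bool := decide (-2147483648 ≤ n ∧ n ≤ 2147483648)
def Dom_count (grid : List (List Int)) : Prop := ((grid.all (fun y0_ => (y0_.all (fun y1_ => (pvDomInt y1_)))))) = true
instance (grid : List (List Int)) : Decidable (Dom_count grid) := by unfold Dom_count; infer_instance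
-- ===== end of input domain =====

-- B replaces A's 2-D double loop with four boundary-checked neighbor adds by a sentinel-padded
-- 1-D flattening: one zero after each row and a trailing zero row turn each adjacency direction
-- into a fixed stride (1, w, w+1, w+2) with no boundary branches. Same cost; return-value
-- equivalence on Pre_count.

-- ===== PORT A =====
-- grid[i][j]: exact whenever both indices are in range (Pre_count guarantees this for every access A makes)
def pvCell (g : List (List Int)) (i j : Int) : Int :=
  PySem.List.pyGetD (PySem.List.pyGetD g i []) j 0

def count (grid : List (List Int)) : Int :=
  (PySem.List.pyRange 0 (grid.length : Int) 1).foldl (fun c i =>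
    (PySem.List.pyRange 0 ((PySem.List.pyGetD grid 0 []).length : Int) 1).foldl (fun c j =>
      if pvCell grid i j ≠ 0 then
        let c1 := if i < (grid.length : Int) - 1 then c + pvCell grid (i + 1) j else c
        let c2 := if j < ((PySem.List.pyGetD grid 0 []).length : Int) - 1 then c1 + pvCell grid i (j + 1) else c1
        let c3 := if 0 < j ∧ i < (grid.length : Int) - 1 then c2 + pvCell grid (i + 1) (j - 1) else c2
        if i < (grid.length : Int) - 1 ∧ j < ((PySem.List.pyGetD grid 0 []).length : Int) - 1 then
          c3 + pvCell grid (i + 1) (j + 1) else c3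
      else c) c) 0

-- ===== PORT B =====
-- flat indices flat[k+…] are read only under the gate flat[k] ≠ 0, which keeps them in range,
-- so pyGetD with default 0 is exact here.
def count_alt (grid : List (List Int)) : Int :=
  if grid = [] then 0
  else
    let w : Int := ((grid.headD []).length : Int)
    let flat : List Int :=
      (grid.map (fun row => PySem.List.slice row none (some w) ++ [0])).flatten
        ++ List.replicate ((grid.headD []).length + 1) 0
    (PySem.List.pyRange 0 ((grid.length : Int) * (w + 1)) 1).foldl (fun t k =>
      if PySem.List.pyGetD flat k 0 ≠ 0 then
        t + PySem.List.pyGetD flat (k + 1) 0 + PySem.List.pyGetD flat (k + w) 0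
          + PySem.List.pyGetD flat (k + w + 1) 0 + PySem.List.pyGetD flat (k + w + 2) 0
      else t) 0

-- ===== PRECONDITION & SPEC =====
-- Pre_count: every row at least as long as row 0. This is exactly the set of inputs on which the
-- Python A returns normally: with some row shorter than row 0, A's unconditional read grid[i][j]
-- for j up to len(grid[0])-1 raises IndexError.
def Pre_count (grid : List (List Int)) : Prop :=
  ∀ row ∈ grid, (grid.headD []).length ≤ row.length
instance (grid : List (List Int)) : Decidable (Pre_count grid) := by unfold Pre_count; infer_instance

def pvWitness_count : List (List Int) := [[1, 0], [0, 1]]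

def Spec_count (grid : List (List Int)) (out : Int) : Prop := out = count_alt grid
instance (grid : List (List Int)) (out : Int) : Decidable (Spec_count grid out) := by unfold Spec_count; infer_instance

-- ===== CLAIM (what is proved, stated in full; the proofs are below) =====
def Claim_equal_count : Prop := ∀ (grid : List (List Int)), Dom_count grid → Pre_count grid → Spec_count grid (count grid)

-- ===== LEMMAS AND PROOFS =====

-- A's loop body for one cell, as a standalone term (Int indices, same conditions as the port)
def aterm (g : List (List Int)) (i j : Int) : Int :=
  if pvCell g i j ≠ 0 then
    (if i < (g.length : Int) - 1 then pvCell g (i + 1) j else 0)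
    + (if j < ((g.headD []).length : Int) - 1 then pvCell g i (j + 1) else 0)
    + (if 0 < j ∧ i < (g.length : Int) - 1 then pvCell g (i + 1) (j - 1) else 0)
    + (if i < (g.length : Int) - 1 ∧ j < ((g.headD []).length : Int) - 1 then pvCell g (i + 1) (j + 1) else 0)
  else 0

-- B's flat array and per-index term, Nat-indexed
def flatN (g : List (List Int)) : List Int :=
  ((g.map (fun row => List.take (g.headD []).length row ++ [0]))
    ++ [List.replicate ((g.headD []).length + 1) 0]).flatten

def bNat (g : List (List Int)) (k : Nat) : Int :=
  if (flatN g).getD k 0 ≠ 0 then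
    (flatN g).getD (k + 1) 0 + (flatN g).getD (k + (g.headD []).length) 0
      + (flatN g).getD (k + (g.headD []).length + 1) 0
      + (flatN g).getD (k + (g.headD []).length + 2) 0
  else 0

theorem getD_zero_headD {α : Type} (l : List α) (d : α) : l.getD 0 d = l.headD d := by
  cases l <;> simp

theorem sum_pyRange_eq (n : Nat) (f : Int → Int) :
    ((PySem.List.pyRange 0 (n : Int) 1).map f).sum
    = ((List.range n).map (fun (k : Nat) => f (k : Int))).sum := by
  rw [PySem.List.pyRange_one]
  have h : ((n : Int) - 0).toNat = n := by omega
  rw [h, List.map_map]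
  apply congrArg
  apply List.map_congr_left
  intro k _
  simp

-- A's double loop as a double sum of aterm
theorem count_eq_sum (g : List (List Int)) :
    count g = ((PySem.List.pyRange 0 (g.length : Int) 1).map (fun i =>
      ((PySem.List.pyRange 0 (((g.headD []).length : Nat) : Int) 1).map
        (fun j => aterm g i j)).sum)).sum := by
  unfold count
  rw [PySem.List.pyGetD_zero, getD_zero_headD]
  rw [PySem.List.foldl_congr_mem' _ _
    (fun c i => c + ((PySem.List.pyRange 0 (((g.headD []).length : Nat) : Int) 1).map
      (fun j => aterm g i j)).sum) _ ?_]
  · rw [PySem.List.foldl_add, zero_add]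
  · intro i _ c
    rw [PySem.List.foldl_congr_mem' _ _ (fun c j => c + aterm g i j) _ ?_]
    · rw [PySem.List.foldl_add]
    · intro j _ c
      unfold aterm
      dsimp only
      split_ifs <;> ring

-- getD through a flatten of uniformly-sized blocks
theorem flatten_uniform_getD (L : List (List Int)) (m : Nat)
    (hm : ∀ r ∈ L, r.length = m) (i j : Nat) (hj : j < m) :
    L.flatten.getD (i * m + j) 0 = if i < L.length then (L.getD i []).getD j 0 else 0 := by
  induction L generalizing i with
  | nil => simp
  | cons r t ih =>
    have hr : r.length = m := hm r (by simp)
    cases i with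
    | zero =>
      simp only [List.flatten_cons, Nat.zero_mul, Nat.zero_add]
      rw [List.getD_append _ _ _ _ (by omega)]
      simp
    | succ i' =>
      have he : (i' + 1) * m + j = r.length + (i' * m + j) := by
        rw [hr]; ring
      simp only [List.flatten_cons, he]
      rw [List.getD_append_right _ _ _ _ (by omega)]
      have hsub : r.length + (i' * m + j) - r.length = i' * m + j := by omega
      rw [hsub, ih (fun s hs => hm s (List.mem_cons_of_mem _ hs)) i']
      simp

-- the flat array read at position i*(w+1)+j, j ≤ w, is the cell (i,j) or a sentinel 0
theorem flat_getD (g : List (List Int)) (hpre : Pre_count g) (i j : Nat)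
    (hj : j ≤ (g.headD []).length) :
    (flatN g).getD (i * ((g.headD []).length + 1) + j) 0
    = if i < g.length ∧ j < (g.headD []).length then (g.getD i []).getD j 0 else 0 := by
  have hetake : ∀ row ∈ g, (List.take (g.headD []).length row).length = (g.headD []).length := by
    intro row hrow
    simp only [List.length_take]
    exact Nat.min_eq_left (hpre row hrow)
  have huni : ∀ r ∈ g.map (fun row => List.take (g.headD []).length row ++ [0])
      ++ [List.replicate ((g.headD []).length + 1) 0], r.length = (g.headD []).length + 1 := by
    intro r hr
    rcases List.mem_append.mp hr with h | h
    · rcases List.mem_map.mp h with ⟨row, hrow, rfl⟩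
      rw [List.length_append, hetake row hrow]
      simp
    · simp only [List.mem_singleton] at h
      simp [h]
  unfold flatN
  rw [flatten_uniform_getD _ ((g.headD []).length + 1) huni i j (by omega)]
  by_cases hi : i < g.length
  · have hrow : g.getD i [] ∈ g := by
      rw [List.getD_eq_getElem g [] hi]; exact List.getElem_mem hi
    have hlen : i < (g.map (fun row => List.take (g.headD []).length row ++ [0])).length := by
      simp [hi]
    rw [if_pos (by simp; omega)]
    have hgetL : (g.map (fun row => List.take (g.headD []).length row ++ [0])
        ++ [List.replicate ((g.headD []).length + 1) 0]).getD i []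
        = (g.getD i []).take (g.headD []).length ++ [0] := by
      rw [List.getD_eq_getElem _ _ (by simp; omega), List.getElem_append_left hlen,
        List.getElem_map, List.getD_eq_getElem g [] hi]
    rw [hgetL]
    have ht : (List.take (g.headD []).length (g.getD i [])).length = (g.headD []).length :=
      hetake _ hrow
    by_cases hjw : j < (g.headD []).length
    · rw [if_pos ⟨hi, hjw⟩]
      rw [List.getD_append _ _ _ _ (by omega), List.getD_eq_getElem _ _ (by omega),
        List.getElem_take]
      rw [List.getD_eq_getElem (g.getD i []) 0 (by have := hpre _ hrow; omega)]
    · have hjw' : j = (g.headD []).length := by omega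
      have hne : ¬(i < g.length ∧ j < (g.headD []).length) := fun h => hjw h.2
      rw [if_neg hne, hjw']
      rw [List.getD_append_right _ _ _ _ (by omega)]
      simp
  · have hne : ¬(i < g.length ∧ j < (g.headD []).length) := fun h => hi h.1
    rw [if_neg hne]
    by_cases hi2 : i < g.length + 1
    · have hieq : i = g.length := by omega
      subst hieq
      have hlt : g.length < (List.map (fun row => List.take (g.headD []).length row ++ [0]) g
          ++ [List.replicate ((g.headD []).length + 1) 0]).length := by simp
      rw [if_pos hlt, List.getD_eq_getElem _ _ hlt, List.getElem_append_right (by simp)]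
      simp
    · have hnlt : ¬ i < (List.map (fun row => List.take (g.headD []).length row ++ [0]) g
          ++ [List.replicate ((g.headD []).length + 1) 0]).length := by simp; omega
      rw [if_neg hnlt]

-- at a row separator (j = w) the flat term vanishes
theorem bNat_sep (g : List (List Int)) (hpre : Pre_count g) (i : Nat) :
    bNat g (i * ((g.headD []).length + 1) + (g.headD []).length) = 0 := by
  unfold bNat
  have hne : ¬(i < g.length ∧ (g.headD []).length < (g.headD []).length) :=
    fun h => lt_irrefl _ h.2
  rw [flat_getD g hpre i _ (le_refl _), if_neg hne]
  simp

-- inside a row the flat term is A's per-cell term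
theorem bNat_eq (g : List (List Int)) (hpre : Pre_count g) (i j : Nat)
    (hi : i < g.length) (hj : j < (g.headD []).length) :
    bNat g (i * ((g.headD []).length + 1) + j) = aterm g (i : Int) (j : Int) := by
  set w := (g.headD []).length with hw
  have hcell : ∀ a b : Nat, pvCell g (a : Int) (b : Int) = (g.getD a []).getD b 0 := by
    intro a b; unfold pvCell; simp
  have e1 : i * (w + 1) + j + 1 = i * (w + 1) + (j + 1) := by ring
  have e3 : i * (w + 1) + j + w + 1 = (i + 1) * (w + 1) + j := by ring
  have e4 : i * (w + 1) + j + w + 2 = (i + 1) * (w + 1) + (j + 1) := by ring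
  unfold bNat
  have hgate : (if i < g.length ∧ j < (g.headD []).length then (g.getD i []).getD j 0 else 0)
      = (g.getD i []).getD j 0 := if_pos ⟨hi, by omega⟩
  rw [← hw, flat_getD g hpre i j (by omega), hgate]
  rw [e1, e3, e4, flat_getD g hpre i (j + 1) (by omega),
    flat_getD g hpre (i + 1) j (by omega), flat_getD g hpre (i + 1) (j + 1) (by omega)]
  have hmid : (flatN g).getD (i * (w + 1) + j + w) 0
      = if 0 < j ∧ i + 1 < g.length then (g.getD (i + 1) []).getD (j - 1) 0 else 0 := by
    by_cases hj0 : 0 < j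
    · have e2 : i * (w + 1) + j + w = (i + 1) * (w + 1) + (j - 1) := by
        cases j with
        | zero => omega
        | succ j' => simp; ring
      rw [e2, flat_getD g hpre (i + 1) (j - 1) (by omega)]
      by_cases h1 : i + 1 < g.length
      · rw [if_pos ⟨h1, by omega⟩, if_pos ⟨hj0, h1⟩]
      · rw [if_neg (by tauto), if_neg (by tauto)]
    · have hj0' : j = 0 := by omega
      subst hj0'
      have e2 : i * (w + 1) + 0 + w = i * (w + 1) + w := by ring
      have hn1 : ¬(i < g.length ∧ (g.headD []).length < (g.headD []).length) :=
        fun h => lt_irrefl _ h.2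
      have hn2 : ¬((0 : Nat) < 0 ∧ i + 1 < g.length) := fun h => Nat.lt_irrefl 0 h.1
      rw [e2, flat_getD g hpre i w (le_refl _), if_neg hn1, if_neg hn2]
  rw [hmid]
  unfold aterm
  rw [hcell i j]
  have c1 : ((i : Int) < (g.length : Int) - 1) ↔ (i + 1 < g.length) := by omega
  have c2 : ((j : Int) < ((g.headD []).length : Int) - 1) ↔ (j + 1 < w) := by
    rw [← hw]; omega
  have c3 : ((0 : Int) < (j : Int)) ↔ (0 < j) := by omega
  have ei : (i : Int) + 1 = ((i + 1 : Nat) : Int) := by push_cast; ring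
  have ej : (j : Int) + 1 = ((j + 1 : Nat) : Int) := by push_cast; ring
  by_cases hc : (g.getD i []).getD j 0 ≠ 0
  · simp only [if_pos hc]
    have t1 : (if i < g.length ∧ j + 1 < w then (g.getD i []).getD (j + 1) 0 else 0)
        = if (j : Int) < ((g.headD []).length : Int) - 1 then pvCell g (i : Int) ((j : Int) + 1) else 0 := by
      rw [ej, hcell i (j + 1)]
      by_cases h : j + 1 < w
      · rw [if_pos ⟨hi, h⟩, if_pos (c2.mpr h)]
      · rw [if_neg (by tauto), if_neg (fun hh => h (c2.mp hh))]
    have t2 : (if i + 1 < g.length ∧ j < w then (g.getD (i + 1) []).getD j 0 else 0)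
        = if (i : Int) < (g.length : Int) - 1 then pvCell g ((i : Int) + 1) (j : Int) else 0 := by
      rw [ei, hcell (i + 1) j]
      by_cases h : i + 1 < g.length
      · rw [if_pos ⟨h, hj⟩, if_pos (c1.mpr h)]
      · rw [if_neg (by tauto), if_neg (fun hh => h (c1.mp hh))]
    have t3 : (if 0 < j ∧ i + 1 < g.length then (g.getD (i + 1) []).getD (j - 1) 0 else 0)
        = if (0 : Int) < (j : Int) ∧ (i : Int) < (g.length : Int) - 1 then
            pvCell g ((i : Int) + 1) ((j : Int) - 1) else 0 := by
      by_cases h : 0 < j ∧ i + 1 < g.length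
      · have ejm : (j : Int) - 1 = ((j - 1 : Nat) : Int) := by omega
        rw [if_pos h, if_pos ⟨c3.mpr h.1, c1.mpr h.2⟩, ei, ejm, hcell (i + 1) (j - 1)]
      · rw [if_neg h, if_neg (fun hh => h ⟨c3.mp hh.1, c1.mp hh.2⟩)]
    have t4 : (if i + 1 < g.length ∧ j + 1 < w then (g.getD (i + 1) []).getD (j + 1) 0 else 0)
        = if (i : Int) < (g.length : Int) - 1 ∧ (j : Int) < ((g.headD []).length : Int) - 1 then
            pvCell g ((i : Int) + 1) ((j : Int) + 1) else 0 := by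
      by_cases h : i + 1 < g.length ∧ j + 1 < w
      · rw [if_pos h, if_pos ⟨c1.mpr h.1, c2.mpr h.2⟩, ei, ej, hcell (i + 1) (j + 1)]
      · rw [if_neg h, if_neg (fun hh => h ⟨c1.mp hh.1, c2.mp hh.2⟩)]
    rw [t1, t2, t3, t4]
    ring
  · simp only [if_neg hc]

-- a length-n*m range sum split into blocks of m
theorem sum_range_mul (n m : Nat) (f : Nat → Int) :
    ((List.range (n * m)).map f).sum
    = ((List.range n).map (fun i => ((List.range m).map (fun j => f (i * m + j))).sum)).sum := by
  induction n with
  | zero => simp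
  | succ p ih =>
    have h1 : (p + 1) * m = p * m + m := by ring
    rw [h1, List.range_add, List.map_append, List.sum_append, ih, List.range_succ,
      List.map_append, List.sum_append, List.map_map]
    simp [Function.comp_def]

-- B's loop as a sum of bNat over the flat range
theorem count_alt_eq_sum (g : List (List Int)) (hg : g ≠ []) :
    count_alt g = ((List.range (g.length * ((g.headD []).length + 1))).map (bNat g)).sum := by
  unfold count_alt
  rw [if_neg hg]
  set w := (g.headD []).length with hw
  have hflat : (g.map (fun row => PySem.List.slice row none (some ((w : Nat) : Int)) ++ [0])).flatten
      ++ List.replicate (w + 1) 0 = flatN g := by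
    unfold flatN
    rw [List.flatten_append, List.flatten_cons, List.flatten_nil, List.append_nil, ← hw]
    congr 1
    apply congrArg
    apply List.map_congr_left
    intro row _
    rw [PySem.List.slice_to_natCast]
  dsimp only
  rw [hflat]
  rw [PySem.List.foldl_congr_mem' _ _
    (fun t k => t + (if PySem.List.pyGetD (flatN g) k 0 ≠ 0 then
      PySem.List.pyGetD (flatN g) (k + 1) 0 + PySem.List.pyGetD (flatN g) (k + (w : Int)) 0
        + PySem.List.pyGetD (flatN g) (k + (w : Int) + 1) 0
        + PySem.List.pyGetD (flatN g) (k + (w : Int) + 2) 0 else 0)) _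
    (by intro x hx acc; split_ifs with hcond <;> simp [hcond] <;> ring)]
  rw [PySem.List.foldl_add, zero_add]
  have hb : (g.length : Int) * ((w : Int) + 1) = ((g.length * (w + 1) : Nat) : Int) := by
    push_cast; ring
  rw [hb, sum_pyRange_eq]
  apply congrArg
  apply List.map_congr_left
  intro k _
  have e0 : (k : Int) + 1 = ((k + 1 : Nat) : Int) := by push_cast; ring
  have e1 : (k : Int) + (w : Int) = ((k + w : Nat) : Int) := by push_cast; ring
  have e2 : (k : Int) + (w : Int) + 1 = ((k + w + 1 : Nat) : Int) := by push_cast; ring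
  have e3 : (k : Int) + (w : Int) + 2 = ((k + w + 2 : Nat) : Int) := by push_cast; ring
  rw [e0, e3, e2, e1]
  simp only [PySem.List.pyGetD_natCast]
  unfold bNat
  rfl

-- ===== VERDICT (by name: the statement is the Claim_ definition above) =====
theorem count_spec : Claim_equal_count := by
  intro grid hdom hpre
  unfold Spec_count
  by_cases hg : grid = []
  · subst hg; decide
  · set w := (grid.headD []).length with hw
    rw [count_eq_sum, sum_pyRange_eq, count_alt_eq_sum grid hg, ← hw,
      sum_range_mul grid.length (w + 1) (bNat grid)]
    apply congrArg
    apply List.map_congr_left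
    intro i hi
    rw [List.mem_range] at hi
    rw [sum_pyRange_eq, List.range_succ, List.map_append, List.sum_append]
    rw [List.map_singleton, List.sum_singleton, bNat_sep grid hpre i, add_zero]
    apply congrArg
    apply List.map_congr_left
    intro j hj
    rw [List.mem_range] at hj
    exact (bNat_eq grid hpre i j hi hj).symm
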